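-- pv_equiv track=rewrite | github.com/boyeje/acoustic-chirp | calcbytes.py | bitstointBE
-- ===== SOURCE A (Python) =====
-- def bitstointBE( bitstab): # toujours en big-endian
-- 	num=0
-- 	bits=bitstab[-1:-(len(bitstab)+1):-1]
-- 	j=0
-- 	for i in bits:
-- 		if i==1:
-- 			num=num+2**j
-- 		j=j+1
-- 	return num
-- ===== SOURCE B (Python) =====
-- def bitstointBE(bitstab):  # big-endian, Horner's method: forward pass, doubling accumulator
--     num = 0
--     for i in bitstab:
--         num = num * 2 + (1 if i == 1 else 0)
--     return num
-- ===== Notes on version B (the rewrite author's own statement) =====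
-- stated objective: idiomatic
-- what changed: Replaces the reversed slice plus positional 2**j exponentiation with a single forward Horner pass that doubles a running accumulator.
import Mathlib
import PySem

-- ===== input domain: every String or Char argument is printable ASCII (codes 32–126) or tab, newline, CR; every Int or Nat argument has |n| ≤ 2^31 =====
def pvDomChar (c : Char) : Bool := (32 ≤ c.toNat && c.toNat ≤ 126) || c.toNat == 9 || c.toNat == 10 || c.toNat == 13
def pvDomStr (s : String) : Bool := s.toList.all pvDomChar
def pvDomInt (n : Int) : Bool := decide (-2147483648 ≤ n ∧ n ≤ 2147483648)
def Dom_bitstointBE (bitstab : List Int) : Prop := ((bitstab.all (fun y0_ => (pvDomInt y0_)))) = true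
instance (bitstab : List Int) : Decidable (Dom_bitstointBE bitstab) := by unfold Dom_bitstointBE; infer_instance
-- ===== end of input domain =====

-- B replaces the reversed slice + 2**j powers with a forward Horner fold (idiomatic rewrite).
-- ===== PORT A =====
-- bits = bitstab[-1:-(len(bitstab)+1):-1]; slice? is none only for step 0, so getD [] is unreachable here
def bitstointBE (bitstab : List Int) : Int :=
  let bits : List Int :=
    (PySem.List.slice? bitstab (some (-1)) (some (-((bitstab.length : Int) + 1))) (-1)).getD []
  let r := bits.foldl (fun (p : Int × Nat) i =>
    (if i == 1 then p.1 + 2 ^ (p.2 : Nat) else p.1, p.2 + 1)) (0, 0)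
  r.1

-- ===== PORT B =====
def bitstointBE_alt (bitstab : List Int) : Int :=
  bitstab.foldl (fun num i => num * 2 + (if i == 1 then 1 else 0)) 0

-- ===== PRECONDITION & SPEC =====
def Spec_bitstointBE (bitstab : List Int) (out : Int) : Prop := out = bitstointBE_alt bitstab
instance (bitstab : List Int) (out : Int) : Decidable (Spec_bitstointBE bitstab out) := by unfold Spec_bitstointBE; infer_instance

-- ===== CLAIM (what is proved, stated in full; the proofs are below) =====
def Claim_equal_bitstointBE : Prop := ∀ (bitstab : List Int), Dom_bitstointBE bitstab → Spec_bitstointBE bitstab (bitstointBE bitstab)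

-- ===== LEMMAS AND PROOFS =====

-- little-endian value of a bit list (weight 2^k at position k, counting only literal 1s)
def leVal : List Int → Int
  | [] => 0
  | b :: t => (if b == 1 then 1 else 0) + 2 * leVal t

theorem slice_rev (xs : List Int) :
    PySem.List.slice? xs (some (-1)) (some (-((xs.length : Int) + 1))) (-1)
      = some xs.reverse := by
  rw [← PySem.List.slice?_none_none_neg_one]
  unfold PySem.List.slice?
  have h : PySem.List.sliceIndices xs.length (some (-1)) (some (-((xs.length : Int) + 1))) (-1)
      = PySem.List.sliceIndices xs.length none none (-1) := by
    unfold PySem.List.sliceIndices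
    simp only [if_pos (show (-1:Int) < 0 by norm_num)]
    refine Prod.ext ?_ (Prod.ext ?_ rfl) <;> simp <;> omega
  rw [h]

theorem foldA (bits : List Int) (num : Int) (j : Nat) :
    (bits.foldl (fun (p : Int × Nat) i =>
      (if i == 1 then p.1 + 2 ^ (p.2 : Nat) else p.1, p.2 + 1)) (num, j)).1
      = num + 2 ^ j * leVal bits := by
  induction bits generalizing num j with
  | nil => simp [leVal]
  | cons b t ih =>
    simp only [List.foldl_cons, leVal, ih, pow_succ]
    split <;> ring

theorem leVal_append_one (l : List Int) (b : Int) :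
    leVal (l ++ [b]) = leVal l + (if b == 1 then 1 else 0) * 2 ^ l.length := by
  induction l with
  | nil => simp [leVal]
  | cons c t ih =>
    simp only [leVal, List.cons_append, ih, List.length_cons, pow_succ]
    split <;> split <;> ring

theorem foldB (xs : List Int) (n : Int) :
    xs.foldl (fun num i => num * 2 + (if i == 1 then 1 else 0)) n
      = n * 2 ^ xs.length + leVal xs.reverse := by
  induction xs generalizing n with
  | nil => simp [leVal]
  | cons b t ih =>
    simp only [List.foldl_cons, ih, List.reverse_cons, leVal_append_one,
      List.length_reverse, List.length_cons, pow_succ]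
    ring

-- ===== VERDICT (by name: the statement is the Claim_ definition above) =====
theorem bitstointBE_spec : Claim_equal_bitstointBE := by
  intro bitstab _
  unfold Spec_bitstointBE bitstointBE bitstointBE_alt
  simp only [slice_rev, Option.getD_some, foldA, foldB, pow_zero, one_mul, zero_mul, zero_add]
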